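-- pv_equiv track=rewrite | github.com/5tukgpt/poker-bot | poker/ai/slumbot_client.py | parse_slumbot_action
-- ===== SOURCE A (Python) =====
-- NUM_STREETS = 4
--
-- SMALL_BLIND = 50
--
-- BIG_BLIND = 100
--
-- def parse_slumbot_action(action: str) -> dict:
--     """Parse the action string from Slumbot into game state.
--
--     Returns dict with:
--       st (street: 0-3)
--       pos (whose turn next: 0 or 1, -1 if hand over)
--       street_last_bet_to (chips bet TO this street, not increment)
--       total_last_bet_to (chips put in this hand TO date)
--       last_bet_size (size of most recent bet/raise as increment)
--       last_bettor (who bet last, -1 if no bet)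
--     """
--     st = 0
--     street_last_bet_to = BIG_BLIND
--     total_last_bet_to = BIG_BLIND
--     last_bet_size = BIG_BLIND - SMALL_BLIND
--     last_bettor = 0
--     sz = len(action)
--     pos = 1  # BB acts after SB preflop (position 0 = SB = button)
--
--     if sz == 0:
--         return {
--             "st": st, "pos": pos,
--             "street_last_bet_to": street_last_bet_to,
--             "total_last_bet_to": total_last_bet_to,
--             "last_bet_size": last_bet_size,
--             "last_bettor": last_bettor,
--         }
--
--     check_or_call_ends_street = False
--     i = 0
--     while i < sz:
--         c = action[i]
--         i += 1
--         if c == "k":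
--             if check_or_call_ends_street:
--                 if i < sz and action[i] == "/":
--                     i += 1
--                 if st == NUM_STREETS - 1:
--                     pos = -1
--                 else:
--                     pos = 0
--                     st += 1
--                 street_last_bet_to = 0
--                 check_or_call_ends_street = False
--             else:
--                 pos = (pos + 1) % 2
--                 check_or_call_ends_street = True
--         elif c == "c":
--             if check_or_call_ends_street:
--                 if i < sz and action[i] == "/":
--                     i += 1
--                 if st == NUM_STREETS - 1:
--                     pos = -1
--                 else:
--                     pos = 0
--                     st += 1
--                 street_last_bet_to = 0
--                 check_or_call_ends_street = False
--             else:
--                 pos = (pos + 1) % 2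
--                 check_or_call_ends_street = True
--             last_bet_size = 0
--             last_bettor = -1
--         elif c == "f":
--             pos = -1
--             return {
--                 "st": st, "pos": pos,
--                 "street_last_bet_to": street_last_bet_to,
--                 "total_last_bet_to": total_last_bet_to,
--                 "last_bet_size": last_bet_size,
--                 "last_bettor": last_bettor,
--             }
--         elif c == "b":
--             j = i
--             while i < sz and "0" <= action[i] <= "9":
--                 i += 1
--             new_street_last_bet_to = int(action[j:i])
--             new_last_bet_size = new_street_last_bet_to - street_last_bet_to
--             last_bet_size = new_last_bet_size
--             street_last_bet_to = new_street_last_bet_to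
--             total_last_bet_to += last_bet_size
--             last_bettor = pos
--             pos = (pos + 1) % 2
--             check_or_call_ends_street = True
--         elif c == "/":
--             continue
--
--     return {
--         "st": st, "pos": pos,
--         "street_last_bet_to": street_last_bet_to,
--         "total_last_bet_to": total_last_bet_to,
--         "last_bet_size": last_bet_size,
--         "last_bettor": last_bettor,
--     }
-- ===== SOURCE B (Python) =====
-- def _tokenize(action):
--     """Split the action string into tokens: 'k','c','f','/', or 'b'+digits.
--     Other characters are dropped (as A silently skips them)."""
--     toks = []
--     i, n = 0, len(action)
--     while i < n:
--         c = action[i]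
--         i += 1
--         if c == "b":
--             j = i
--             while i < n and action[i].isdigit():
--                 i += 1
--             toks.append(action[j - 1:i])
--         elif c in "kcf/":
--             toks.append(c)
--     return toks
--
--
-- def _advance(st, pos, street_last_bet_to, ends):
--     """Shared street-advance logic for a check or a call."""
--     if ends:
--         if st == 3:
--             return st, -1, 0, False
--         return st + 1, 0, 0, False
--     return st, (pos + 1) % 2, street_last_bet_to, True
--
--
-- def parse_slumbot_action(action: str) -> dict:
--     st, pos = 0, 1
--     street_last_bet_to = total_last_bet_to = 100
--     last_bet_size, last_bettor = 50, 0
--     ends = False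
--     for tok in _tokenize(action):
--         if tok == "k" or tok == "c":
--             st, pos, street_last_bet_to, ends = _advance(st, pos, street_last_bet_to, ends)
--             if tok == "c":
--                 last_bet_size, last_bettor = 0, -1
--         elif tok == "f":
--             pos = -1
--             break
--         elif tok.startswith("b"):
--             new_to = int(tok[1:])   # raises ValueError on a bare 'b', like A's int('')
--             last_bet_size = new_to - street_last_bet_to
--             total_last_bet_to += last_bet_size
--             street_last_bet_to = new_to
--             last_bettor = pos
--             pos = (pos + 1) % 2
--             ends = True
--         # "/" is a no-op token
--     return {
--         "st": st, "pos": pos,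
--         "street_last_bet_to": street_last_bet_to,
--         "total_last_bet_to": total_last_bet_to,
--         "last_bet_size": last_bet_size,
--         "last_bettor": last_bettor,
--     }
-- ===== Notes on version B (the rewrite author's own statement) =====
-- stated objective: simpler
-- what changed: A's single index-walking while-loop with in-loop lookahead and digit scanning is replaced by a two-phase decomposition: a tokenizer that splits the string into action tokens ('k','c','f','/','b'+digits) and a fold over the token list that treats '/' as a no-op and handles check and call through one shared street-advance helper.
import Mathlib
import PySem

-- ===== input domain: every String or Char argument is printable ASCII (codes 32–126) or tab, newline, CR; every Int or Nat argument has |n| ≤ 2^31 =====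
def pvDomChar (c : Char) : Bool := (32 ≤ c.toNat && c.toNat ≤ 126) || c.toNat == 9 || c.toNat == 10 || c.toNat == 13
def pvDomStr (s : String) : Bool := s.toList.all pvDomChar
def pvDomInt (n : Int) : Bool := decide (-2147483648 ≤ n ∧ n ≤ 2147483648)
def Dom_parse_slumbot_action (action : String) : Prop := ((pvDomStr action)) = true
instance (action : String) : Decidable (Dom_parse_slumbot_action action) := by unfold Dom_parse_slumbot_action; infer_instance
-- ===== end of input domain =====

-- B replaces A's single index-walking while-loop by a two-phase decomposition
-- (tokenize, then fold over tokens with a shared street-advance helper); objective: simpler.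

-- ===== PORT A =====

-- rendering of the returned dict (insertion order)
def pvRender (st pos slbt tlbt lbs lb : Int) : List (String × Int) :=
  [("st", st), ("pos", pos), ("street_last_bet_to", slbt),
   ("total_last_bet_to", tlbt), ("last_bet_size", lbs), ("last_bettor", lb)]

-- A's digit test `"0" <= action[i] <= "9"`
def pvIsDig (c : Char) : Bool := decide ('0' ≤ c ∧ c ≤ '9')

-- A's while-loop over the remaining characters; the index i only moves forward, so the
-- suffix of the string is the recursion argument.  `int(action[j:i])` is
-- PySem.Int.ofStr?; on an empty digit span Python raises ValueError — excluded by
-- Pre_parse_slumbot_action; there the port returns a junk value via getD 0.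
def pvLoopA (cs : List Char) (st pos slbt tlbt lbs lb : Int) (flag : Bool) :
    List (String × Int) :=
  match cs with
  | [] => pvRender st pos slbt tlbt lbs lb
  | c :: rest =>
    if c = 'k' then
      if flag then
        let rest' := if rest.head? = some '/' then rest.tail else rest
        if st = 3 then pvLoopA rest' st (-1) 0 tlbt lbs lb false
        else pvLoopA rest' (st + 1) 0 0 tlbt lbs lb false
      else pvLoopA rest st (PySem.Int.mod (pos + 1) 2) slbt tlbt lbs lb true
    else if c = 'c' then
      if flag then
        let rest' := if rest.head? = some '/' then rest.tail else rest
        if st = 3 then pvLoopA rest' st (-1) 0 tlbt 0 (-1) false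
        else pvLoopA rest' (st + 1) 0 0 tlbt 0 (-1) false
      else pvLoopA rest st (PySem.Int.mod (pos + 1) 2) slbt tlbt 0 (-1) true
    else if c = 'f' then pvRender st (-1) slbt tlbt lbs lb
    else if c = 'b' then
      let n := (PySem.Int.ofStr? (String.ofList (rest.takeWhile pvIsDig))).getD 0
      pvLoopA (rest.dropWhile pvIsDig) st (PySem.Int.mod (pos + 1) 2) n
        (tlbt + (n - slbt)) (n - slbt) pos true
    else pvLoopA rest st pos slbt tlbt lbs lb flag
  termination_by cs.length
  decreasing_by
  all_goals first
    | (have := List.length_dropWhile_le pvIsDig rest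
       simp only [List.length_cons]; omega)
    | (split <;> simp only [List.length_cons, List.length_tail] <;> omega)

def parse_slumbot_action (action : String) : List (String × Int) :=
  if action.toList.length = 0 then pvRender 0 1 100 100 50 0
  else pvLoopA action.toList 0 1 100 100 50 0 false

-- ===== PORT B =====

-- Source B's _tokenize: split into tokens 'k','c','f','/', or 'b'+digits; drop other chars
def pvTokenize (cs : List Char) : List (List Char) :=
  match cs with
  | [] => []
  | c :: rest =>
    if c = 'b' then
      ('b' :: rest.takeWhile Char.isDigit) :: pvTokenize (rest.dropWhile Char.isDigit)
    else if c = 'k' ∨ c = 'c' ∨ c = 'f' ∨ c = '/' then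
      [c] :: pvTokenize rest
    else pvTokenize rest
  termination_by cs.length
  decreasing_by
  all_goals
    (have := List.length_dropWhile_le Char.isDigit rest
     simp only [List.length_cons]; omega)

-- Source B's _advance: shared street-advance for a check or a call
def pvAdvance (st pos slbt : Int) (ends : Bool) : Int × Int × Int × Bool :=
  if ends then
    if st = 3 then (st, -1, 0, false) else (st + 1, 0, 0, false)
  else (st, PySem.Int.mod (pos + 1) 2, slbt, true)

-- Source B's fold over the token list (the for-loop with break)
def pvRunB (ts : List (List Char)) (st pos slbt tlbt lbs lb : Int) (ends : Bool) :
    List (String × Int) :=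
  match ts with
  | [] => pvRender st pos slbt tlbt lbs lb
  | tok :: rest =>
    if tok = ['k'] ∨ tok = ['c'] then
      let r := pvAdvance st pos slbt ends
      if tok = ['c'] then pvRunB rest r.1 r.2.1 r.2.2.1 tlbt 0 (-1) r.2.2.2
      else pvRunB rest r.1 r.2.1 r.2.2.1 tlbt lbs lb r.2.2.2
    else if tok = ['f'] then pvRender st (-1) slbt tlbt lbs lb
    else
      match tok with
      | 'b' :: ds =>
        let n := (PySem.Int.ofStr? (String.ofList ds)).getD 0
        pvRunB rest st (PySem.Int.mod (pos + 1) 2) n (tlbt + (n - slbt)) (n - slbt) pos true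
      | _ => pvRunB rest st pos slbt tlbt lbs lb ends

def parse_slumbot_action_alt (action : String) : List (String × Int) :=
  pvRunB (pvTokenize action.toList) 0 1 100 100 50 0 false

-- ===== PRECONDITION & SPEC =====
-- Pre_ excludes exactly the inputs on which A raises ValueError: a 'b' not followed by
-- a digit (int('') on the empty digit span) that is not preceded by an 'f' (an earlier
-- fold returns before the bad bet is reached); B raises the same ValueError there.
def Pre_parse_slumbot_action (action : String) : Prop :=
  ∀ i ∈ List.range action.toList.length,
    (action.toList.getD i ' ' = 'b' ∧ (action.toList.getD (i + 1) ' ').isDigit = false) →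
      ∃ j ∈ List.range i, action.toList.getD j ' ' = 'f' 
instance (action : String) : Decidable (Pre_parse_slumbot_action action) := by
  unfold Pre_parse_slumbot_action; infer_instance

def pvWitness_parse_slumbot_action : String := "b200c/kb50c/kk/b100b300c"

def Spec_parse_slumbot_action (action : String) (out : List (String × Int)) : Prop := out = parse_slumbot_action_alt action
instance (action : String) (out : List (String × Int)) : Decidable (Spec_parse_slumbot_action action out) := by unfold Spec_parse_slumbot_action; infer_instance

-- ===== CLAIM (what is proved, stated in full; the proofs are below) =====
def Claim_equal_parse_slumbot_action : Prop := ∀ (action : String), Dom_parse_slumbot_action action → Pre_parse_slumbot_action action → Spec_parse_slumbot_action action (parse_slumbot_action action)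

-- ===== LEMMAS AND PROOFS =====

-- A's per-character digit test and B's Char.isDigit agree
lemma pvIsDig_eq : pvIsDig = Char.isDigit := by
  funext c
  unfold pvIsDig
  by_cases h : '0' ≤ c ∧ c ≤ '9'
  · simp [h]; simp [Char.isDigit, Char.le_def] at h ⊢; omega
  · simp [h]; simp [Char.isDigit, Char.le_def] at h ⊢; omega

-- the loops agree: running A's character loop on a suffix equals running B's token
-- fold on the tokenization of that suffix (induction on the length of the suffix)
lemma pvLoop_eq (n : Nat) : ∀ (cs : List Char), cs.length ≤ n →
    ∀ (st pos slbt tlbt lbs lb : Int) (flag : Bool),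
    pvLoopA cs st pos slbt tlbt lbs lb flag = pvRunB (pvTokenize cs) st pos slbt tlbt lbs lb flag := by
  induction n with
  | zero =>
    intro cs hl
    have : cs = [] := List.eq_nil_of_length_eq_zero (by omega)
    subst this
    intro st pos slbt tlbt lbs lb flag
    simp [pvLoopA, pvTokenize, pvRunB]
  | succ n ih =>
    intro cs hl st pos slbt tlbt lbs lb flag
    match cs with
    | [] => simp [pvLoopA, pvTokenize, pvRunB]
    | c :: rest =>
      simp only [List.length_cons] at hl
      have hr : rest.length ≤ n := by omega
      have hR : ∀ (st pos slbt tlbt lbs lb : Int) (flag : Bool),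
          pvLoopA rest st pos slbt tlbt lbs lb flag
            = pvRunB (pvTokenize rest) st pos slbt tlbt lbs lb flag := ih rest hr
      by_cases hk : c = 'k' ∨ c = 'c'
      · -- check or call
        rcases flag with _ | _
        · -- flag = false : swap position, set the flag
          rcases hk with hk | hk <;> subst hk <;>
            rw [pvLoopA, pvTokenize] <;>
            simp [pvRunB, pvAdvance, hR]
        · -- flag = true : street ends; A may additionally consume a following '/',
          -- which B's fold skips as a '/' token
          have hS : ∀ (st pos slbt tlbt lbs lb : Int) (flag : Bool),
              (if rest.head? = some '/' then pvLoopA rest.tail st pos slbt tlbt lbs lb flag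
               else pvLoopA rest st pos slbt tlbt lbs lb flag)
                = pvRunB (pvTokenize rest) st pos slbt tlbt lbs lb flag := by
            intro st pos slbt tlbt lbs lb flag
            match rest with
            | [] => simp [pvLoopA, pvTokenize, pvRunB]
            | a :: r =>
              by_cases ha : a = '/'
              · subst ha
                have hr' : r.length ≤ n := by simp at hr; omega
                rw [pvTokenize]
                simp [pvRunB, ih r hr']
              · simp [List.head?, ha, hR]
          rcases hk with hk | hk <;> subst hk <;>
            rw [pvLoopA, pvTokenize] <;>
            by_cases h3 : st = 3 <;>
            simp [pvRunB, pvAdvance, h3] <;>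
            (rw [← hS]; split <;> rfl)
      · push Not at hk
        obtain ⟨hk1, hk2⟩ := hk
        by_cases hf : c = 'f'
        · subst hf
          rw [pvLoopA, pvTokenize]
          simp [pvRunB]
        · by_cases hb : c = 'b'
          · subst hb
            have hr' : (rest.dropWhile Char.isDigit).length ≤ n := by
              have := List.length_dropWhile_le Char.isDigit rest; omega
            rw [pvLoopA, pvTokenize]
            simp [pvIsDig_eq, pvRunB, ih _ hr']
          · rw [pvLoopA, pvTokenize]
            by_cases hs : c = '/'
            · subst hs
              simp [pvRunB, hR]
            · simp [hk1, hk2, hf, hb, hs, hR]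

-- ===== VERDICT (by name: the statement is the Claim_ definition above) =====
theorem parse_slumbot_action_spec : Claim_equal_parse_slumbot_action := by
  intro action _ _
  unfold Spec_parse_slumbot_action parse_slumbot_action parse_slumbot_action_alt
  by_cases h : action.toList.length = 0
  · have : action.toList = [] := List.eq_nil_of_length_eq_zero h
    simp [this, pvTokenize, pvRunB, pvRender]
  · simp only [if_neg h]
    exact pvLoop_eq action.toList.length action.toList le_rfl 0 1 100 100 50 0 false
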